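-- pv_equiv track=rewrite | github.com/dickinson-comp130-sp2026/web | resources/class40/recursion_review.py | f
-- ===== SOURCE A (Python) =====
-- def f(s):
--     assert isinstance(s, str)
--     assert len(s) >= 2
--     if len(s) > 8:
--         return s
--     t = f(s[1:] + s[0] + 'abc')
--     if t.isupper():
--         return t.lower()
--     return t.upper()
-- ===== SOURCE B (Python) =====
-- def f(s):
--     assert isinstance(s, str)
--     assert len(s) >= 2
--     k = (11 - len(s)) // 3
--     for _ in range(k):
--         s = s[1:] + s[0] + 'abc'
--     for _ in range(k):
--         s = s.lower() if s.isupper() else s.upper()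
--     return s
-- ===== Notes on version B (the rewrite author's own statement) =====
-- stated objective: alternative
-- what changed: Replaces the descend-then-unwind recursion by a closed-form step count k = (11 - len(s)) // 3, then applies the rotate-and-append step k times and the case toggle k times in two plain for loops.
import Mathlib
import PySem

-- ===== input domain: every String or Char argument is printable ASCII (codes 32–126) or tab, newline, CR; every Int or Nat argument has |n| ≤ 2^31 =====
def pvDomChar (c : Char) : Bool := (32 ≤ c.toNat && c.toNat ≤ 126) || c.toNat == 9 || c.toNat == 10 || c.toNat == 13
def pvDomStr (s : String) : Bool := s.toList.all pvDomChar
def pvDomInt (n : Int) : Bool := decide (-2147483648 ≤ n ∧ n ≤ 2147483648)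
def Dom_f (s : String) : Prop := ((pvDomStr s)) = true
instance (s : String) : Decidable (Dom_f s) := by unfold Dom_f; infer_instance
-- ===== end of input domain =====

-- B replaces A's descend-then-unwind recursion by a closed-form step count k = (11-len)//3
-- followed by two bounded for-loops (objective: alternative decomposition, not faster).

-- shared primitive port of Python's str.isupper() (no PySem string-level isupper):
-- true iff the string has at least one cased character and no lowercase one; exact on ASCII,
-- where the cased characters are exactly the letters.
def pyStrIsupper (cs : List Char) : Bool :=
  cs.any PySem.Str.isalpha && cs.all (fun c => !PySem.Str.islower c)

-- shared port of the toggle expression 's.lower() if s.isupper() else s.upper()'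
def pvToggle (t : List Char) : List Char :=
  if pyStrIsupper t then PySem.Chars.lower t else PySem.Chars.upper t

-- ===== PORT A =====
-- A's recursion on the code points; the asserts are Pre_f.  On the empty string
-- (outside Pre_f) Python's s[0] would raise; the port returns l there.
def fChars (l : List Char) : List Char :=
  if l.length > 8 then l
  else
    match h : PySem.List.pyGet? l 0 with
    | none => l
    | some c =>
      let t := fChars (PySem.List.slice l (some 1) none ++ [c] ++ ['a', 'b', 'c'])
      pvToggle t
termination_by 9 - l.length
decreasing_by
  have hne : l ≠ [] := by
    intro hl; subst hl; simp [PySem.List.pyGet?] at h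
  simp [PySem.List.slice_from_one]
  have : 1 ≤ l.length := List.length_pos_iff.mpr hne
  omega

def f (s : String) : String := String.ofList (fChars s.toList)

-- ===== PORT B =====
-- B's loop body 's = s[1:] + s[0] + 'abc''; on the empty string (never reached
-- inside Pre_f) Python's s[0] would raise; the port returns t there.
def pvStep (t : List Char) : List Char :=
  match PySem.List.pyGet? t 0 with
  | none => t
  | some c => PySem.List.slice t (some 1) none ++ [c] ++ ['a', 'b', 'c']

def f_alt (s : String) : String :=
  let k := PySem.Int.floordiv (11 - PySem.Str.len s) 3
  let t1 := (PySem.List.pyRange 0 k 1).foldl (fun t _ => pvStep t) s.toList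
  let t2 := (PySem.List.pyRange 0 k 1).foldl (fun t _ => pvToggle t) t1
  String.ofList t2

-- ===== PRECONDITION & SPEC =====
-- Pre_f excludes strings of length < 2, on which A's assert raises AssertionError.
def Pre_f (s : String) : Prop := 2 ≤ s.toList.length
instance (s : String) : Decidable (Pre_f s) := by unfold Pre_f; infer_instance
def pvWitness_f : String := "Hi"

def Spec_f (s : String) (out : String) : Prop := out = f_alt s
instance (s : String) (out : String) : Decidable (Spec_f s out) := by unfold Spec_f; infer_instance

-- ===== CLAIM (what is proved, stated in full; the proofs are below) =====
def Claim_equal_f : Prop := ∀ (s : String), Dom_f s → Pre_f s → Spec_f s (f s)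

-- ===== LEMMAS AND PROOFS =====

-- folding a constant-per-element function is iteration of that function
lemma foldl_const_iterate {α β : Type} (g : α → α) (xs : List β) (x : α) :
    xs.foldl (fun a _ => g a) x = g^[xs.length] x := by
  induction xs generalizing x with
  | nil => simp
  | cons b bs ih => simp [List.foldl_cons, ih, Function.iterate_succ_apply]

lemma pvStep_length (l : List Char) (hne : l ≠ []) :
    (pvStep l).length = l.length + 3 := by
  obtain ⟨c, cs, rfl⟩ : ∃ c cs, l = c :: cs := by
    cases l with
    | nil => exact absurd rfl hne
    | cons c cs => exact ⟨c, cs, rfl⟩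
  simp [pvStep, PySem.List.slice_from_one]

lemma pvStep_ne_nil (l : List Char) (hne : l ≠ []) : pvStep l ≠ [] := by
  intro h
  have := congrArg List.length h
  rw [pvStep_length l hne] at this
  simp at this

-- A's recursion equals: iterate the step k times, then toggle k times, k = (11 - len) / 3
lemma fChars_eq_iter (n : Nat) : ∀ l : List Char, 9 - l.length ≤ n → l ≠ [] →
    fChars l = pvToggle^[(11 - l.length) / 3] (pvStep^[(11 - l.length) / 3] l) := by
  induction n with
  | zero =>
    intro l hn _
    have h8 : l.length > 8 := by omega
    have hk : (11 - l.length) / 3 = 0 := by omega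
    rw [fChars]
    simp [h8, hk]
  | succ n ih =>
    intro l hn hne
    by_cases h8 : l.length > 8
    · have hk : (11 - l.length) / 3 = 0 := by omega
      rw [fChars]; simp [h8, hk]
    · have hpos : 1 ≤ l.length := List.length_pos_iff.mpr hne
      obtain ⟨c, cs, rfl⟩ : ∃ c cs, l = c :: cs := by
        cases l with
        | nil => exact absurd rfl hne
        | cons c cs => exact ⟨c, cs, rfl⟩
      have hget : PySem.List.pyGet? (c :: cs) 0 = some c :=
        PySem.List.pyGet?_zero_cons c cs
      rw [fChars]
      simp only [h8, if_false]
      split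
      · rename_i heq; rw [hget] at heq; exact absurd heq (by simp)
      rename_i d heq; rw [hget] at heq; injection heq with hc; subst hc
      have hstep : PySem.List.slice (c :: cs) (some 1) none ++ [c] ++ ['a', 'b', 'c']
          = pvStep (c :: cs) := by
        simp [pvStep]
      rw [hstep]
      have hlen' : (pvStep (c :: cs)).length = (c :: cs).length + 3 :=
        pvStep_length _ (by simp)
      have hne' : pvStep (c :: cs) ≠ [] := pvStep_ne_nil _ (by simp)
      have hrec := ih (pvStep (c :: cs)) (by omega) hne'
      rw [hrec, hlen']
      have hk : (11 - (c :: cs).length) / 3 = (11 - ((c :: cs).length + 3)) / 3 + 1 := by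
        omega
      rw [hk, Function.iterate_succ_apply pvStep, Function.iterate_succ_apply' pvToggle]

-- the Int step count of B equals the Nat step count of the lemma above
lemma toNat_k (m : Nat) :
    (PySem.Int.floordiv (11 - (m : Int)) 3).toNat = (11 - m) / 3 := by
  by_cases h : m ≤ 11
  · have h1 : (11 - (m : Int)) = ((11 - m : Nat) : Int) := by omega
    rw [h1, show (3 : Int) = ((3 : Nat) : Int) by norm_num, PySem.Int.floordiv_natCast]
    exact Int.toNat_natCast ((11 - m) / 3)
  · have hneg : (11 - (m : Int)) < 0 := by omega
    have h1 : PySem.Int.floordiv (11 - (m : Int)) 3 = (11 - (m : Int)) / 3 :=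
      PySem.Int.floordiv_eq_ediv_of_pos (by norm_num)
    have h2 : (11 - (m : Int)) / 3 < 0 := Int.ediv_neg_of_neg_of_pos hneg (by norm_num)
    have h3 : (11 - m) / 3 = 0 := by omega
    rw [h1, h3]
    omega

-- ===== VERDICT (by name: the statement is the Claim_ definition above) =====
theorem f_spec : Claim_equal_f := by
  intro s _ hpre
  unfold Pre_f at hpre
  unfold Spec_f f f_alt
  have hne : s.toList ≠ [] := by
    intro h; rw [h] at hpre; simp at hpre
  have hlen : PySem.Str.len s = (s.toList.length : Int) := by
    simp [PySem.Str.len_eq]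
  simp only [hlen, foldl_const_iterate, PySem.List.length_pyRange_one, Int.sub_zero]
  rw [toNat_k]
  rw [fChars_eq_iter (9 - s.toList.length) s.toList le_rfl hne]
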